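-- pv_equiv track=rewrite | github.com/fmidev/synop-to-bufr | separate_keys_and_values.py | longest_row
-- ===== SOURCE A (Python) =====
-- def longest_row(rows):
--     """
--     This functions check the longest row from rows.
--     """
--     number_of_rows = len(rows)
--     longest = 0
--     for i in range(0, number_of_rows - 1):
--         l_a = len(rows[i])
--         l_b = len(rows[i+1])
--         if l_b > l_a:
--             longest = i + 1
--     return longest
-- ===== SOURCE B (Python) =====
-- def longest_row(rows):
--     # Reverse scan with early exit: the first increasing adjacency found
--     # from the end is the last one a forward pass would record.
--     for j in range(len(rows) - 1, 0, -1):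
--         if len(rows[j]) > len(rows[j - 1]):
--             return j
--     return 0
-- ===== Notes on version B (the rewrite author's own statement) =====
-- stated objective: alternative
-- what changed: Replaces A's full forward fold that overwrites an accumulator at every increasing adjacency with a backward scan that early-returns at the first increasing adjacency seen from the end (no accumulator, partial scan).
import Mathlib
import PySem

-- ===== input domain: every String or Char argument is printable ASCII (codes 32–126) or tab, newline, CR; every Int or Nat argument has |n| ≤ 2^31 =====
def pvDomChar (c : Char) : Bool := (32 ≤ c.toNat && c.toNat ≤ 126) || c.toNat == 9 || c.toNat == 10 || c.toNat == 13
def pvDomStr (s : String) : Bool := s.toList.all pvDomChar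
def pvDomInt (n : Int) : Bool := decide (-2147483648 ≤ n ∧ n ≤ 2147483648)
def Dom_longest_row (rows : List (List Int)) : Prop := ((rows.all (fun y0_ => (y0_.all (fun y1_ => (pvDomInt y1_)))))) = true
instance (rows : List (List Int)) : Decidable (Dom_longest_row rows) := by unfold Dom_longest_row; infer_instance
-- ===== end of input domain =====

-- B replaces A's full forward accumulator fold with a backward early-exit scan; same result, alternative decomposition.


-- ===== PORT A =====
def longest_row (rows : List (List Int)) : Int :=
  (PySem.List.pyRange 0 ((rows.length : Int) - 1) 1).foldl
    (fun longest i =>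
      let l_a := ((PySem.List.pyGet? rows i).getD []).length
      let l_b := ((PySem.List.pyGet? rows (i + 1)).getD []).length
      if l_b > l_a then i + 1 else longest) 0

-- ===== PORT B =====
-- range(len(rows)-1, 0, -1): j counts down; first increasing adjacency returns j, else 0.
def longest_row_altGo (rows : List (List Int)) : Nat → Int
  | 0 => 0
  | j + 1 =>
    if (rows.getD (j + 1) []).length > (rows.getD j []).length then ((j : Int) + 1)
    else longest_row_altGo rows j

def longest_row_alt (rows : List (List Int)) : Int :=
  longest_row_altGo rows (rows.length - 1)

-- ===== PRECONDITION & SPEC =====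
def Spec_longest_row (rows : List (List Int)) (out : Int) : Prop := out = longest_row_alt rows
instance (rows : List (List Int)) (out : Int) : Decidable (Spec_longest_row rows out) := by unfold Spec_longest_row; infer_instance

-- ===== CLAIM (what is proved, stated in full; the proofs are below) =====
def Claim_equal_longest_row : Prop := ∀ (rows : List (List Int)), Dom_longest_row rows → Spec_longest_row rows (longest_row rows)

-- ===== LEMMAS AND PROOFS =====
theorem pyGet_eq_getD (rows : List (List Int)) (k : Nat) :
    ((PySem.List.pyGet? rows (k : Int)).getD []) = rows.getD k [] := by
  rw [PySem.List.pyGet?_natCast]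
  cases h : rows[k]? with
  | none => simp [List.getD, h]
  | some v => simp [List.getD, h]

theorem foldl_eq_altGo (rows : List (List Int)) (k : Nat) :
    ((List.range k).map (fun j : Nat => ((0 : Int) + j))).foldl
      (fun longest i =>
        let l_a := ((PySem.List.pyGet? rows i).getD []).length
        let l_b := ((PySem.List.pyGet? rows (i + 1)).getD []).length
        if l_b > l_a then i + 1 else longest) 0 = longest_row_altGo rows k := by
  induction k with
  | zero => simp [longest_row_altGo]
  | succ j ih =>
    rw [List.range_succ, List.map_append, List.foldl_append, ih]
    have h1 : ((0 : Int) + (j : Int)) = (j : Int) := by ring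
    have h2 : ((j : Int) + 1) = ((j + 1 : Nat) : Int) := by push_cast; ring
    simp only [List.map_cons, List.map_nil, List.foldl_cons, List.foldl_nil, h1, h2,
      pyGet_eq_getD, longest_row_altGo]

theorem longest_row_spec' (rows : List (List Int)) :
    longest_row rows = longest_row_alt rows := by
  unfold longest_row longest_row_alt
  rw [PySem.List.pyRange_one]
  have : (((rows.length : Int) - 1) - 0).toNat = rows.length - 1 := by omega
  rw [this]
  exact foldl_eq_altGo rows (rows.length - 1)

-- ===== VERDICT (by name: the statement is the Claim_ definition above) =====
theorem longest_row_spec : Claim_equal_longest_row := by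
  intro rows _
  exact longest_row_spec' rows
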